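-- pv_equiv track=rewrite | github.com/squancy/aoc-solutions | 2024/9.py | find_si_block
-- ===== SOURCE A (Python) =====
-- def find_si_block(bi_start, size, m):
--     i = 0
--     while i < len(m):
--         if i >= bi_start: break
--         sz = 0
--         j = i
--         while j < len(m) and m[j] == None:
--             sz += 1
--             j += 1
--         if sz >= size:
--             return i
--         i += 1
--     return None
-- ===== SOURCE B (Python) =====
-- def find_si_block(bi_start, size, m):
--     n = len(m)
--     rlen = [0] * (n + 1)
--     for i in range(n - 1, -1, -1):
--         rlen[i] = rlen[i + 1] + 1 if m[i] is None else 0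
--     for i in range(n):
--         if i >= bi_start:
--             break
--         if rlen[i] >= size:
--             return i
--     return None
-- ===== Notes on version B (the rewrite author's own statement) =====
-- stated objective: faster
-- what changed: Replaces A's per-index forward rescans of the None-run with a single reverse pass building a suffix run-length table followed by one forward scan.
import Mathlib
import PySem

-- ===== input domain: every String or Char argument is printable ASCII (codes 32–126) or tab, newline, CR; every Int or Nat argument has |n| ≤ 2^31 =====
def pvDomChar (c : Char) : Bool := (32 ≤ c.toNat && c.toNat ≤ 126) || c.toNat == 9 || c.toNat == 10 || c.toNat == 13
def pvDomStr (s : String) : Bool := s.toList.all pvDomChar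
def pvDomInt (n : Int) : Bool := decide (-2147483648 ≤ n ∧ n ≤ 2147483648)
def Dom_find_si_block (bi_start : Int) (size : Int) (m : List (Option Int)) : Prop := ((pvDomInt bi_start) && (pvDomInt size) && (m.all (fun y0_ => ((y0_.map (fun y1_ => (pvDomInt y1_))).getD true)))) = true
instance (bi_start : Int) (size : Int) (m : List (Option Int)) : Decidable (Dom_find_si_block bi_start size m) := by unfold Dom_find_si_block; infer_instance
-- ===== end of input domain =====

-- B replaces A's per-index rescans with one reverse-pass suffix run-length table plus a single
-- forward scan (objective: faster, O(n) instead of O(n^2)).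

-- ===== PORT A =====
-- inner while loop: sz accumulates while j < len(m) and m[j] == None
def pvInnerA (m : List (Option Int)) (j : Nat) (sz : Nat) : Nat :=
  if h : m[j]? = some none then pvInnerA m (j+1) (sz+1) else sz
termination_by m.length - j
decreasing_by
  have := (List.getElem?_eq_some_iff.mp h).1
  omega

-- outer while loop over i
def pvLoopA (bi_start size : Int) (m : List (Option Int)) (i : Nat) : Option Int :=
  if h : i < m.length then
    if (i : Int) ≥ bi_start then none
    else if ((pvInnerA m i 0 : Nat) : Int) ≥ size then some (i : Int)
    else pvLoopA bi_start size m (i+1)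
  else none
termination_by m.length - i

def find_si_block (bi_start : Int) (size : Int) (m : List (Option Int)) : Option Int :=
  pvLoopA bi_start size m 0

-- ===== PORT B =====
-- reverse pass: rlen[i] = rlen[i+1]+1 if m[i] is None else 0 (sentinel rlen[n] = 0)
def pvBuildRlen : List (Option Int) → List Nat
  | [] => []
  | x :: xs =>
    let rest := pvBuildRlen xs
    (if x = none then rest.headD 0 + 1 else 0) :: rest

-- forward scan: break at bi_start, return first i with rlen[i] >= size
def pvScanB (bi_start size : Int) : List Nat → Nat → Option Int
  | [], _ => none
  | r :: rest, i =>
    if (i : Int) ≥ bi_start then none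
    else if ((r : Nat) : Int) ≥ size then some (i : Int)
    else pvScanB bi_start size rest (i+1)

def find_si_block_alt (bi_start : Int) (size : Int) (m : List (Option Int)) : Option Int :=
  pvScanB bi_start size (pvBuildRlen m) 0

-- ===== PRECONDITION & SPEC =====
def Spec_find_si_block (bi_start : Int) (size : Int) (m : List (Option Int)) (out : Option Int) : Prop := out = find_si_block_alt bi_start size m
instance (bi_start : Int) (size : Int) (m : List (Option Int)) (out : Option Int) : Decidable (Spec_find_si_block bi_start size m out) := by unfold Spec_find_si_block; infer_instance

-- ===== CLAIM (what is proved, stated in full; the proofs are below) =====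
def Claim_equal_find_si_block : Prop := ∀ (bi_start : Int) (size : Int) (m : List (Option Int)), Dom_find_si_block bi_start size m → Spec_find_si_block bi_start size m (find_si_block bi_start size m)

-- ===== LEMMAS AND PROOFS =====

-- length of the None-run at the head of a suffix
def pvRun : List (Option Int) → Nat
  | [] => 0
  | none :: xs => pvRun xs + 1
  | some _ :: _ => 0

theorem pvBuildRlen_headD (xs : List (Option Int)) : (pvBuildRlen xs).headD 0 = pvRun xs := by
  induction xs with
  | nil => rfl
  | cons x xs ih =>
    cases x with
    | none =>
      show ((if (none : Option Int) = none then (pvBuildRlen xs).headD 0 + 1 else 0) ::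
        pvBuildRlen xs).headD 0 = pvRun xs + 1
      rw [if_pos rfl, List.headD_cons, ih]
    | some v => simp [pvBuildRlen, pvRun]

theorem pvBuildRlen_cons (x : Option Int) (xs : List (Option Int)) :
    pvBuildRlen (x :: xs) = pvRun (x :: xs) :: pvBuildRlen xs := by
  cases x with
  | none =>
    show (if (none : Option Int) = none then (pvBuildRlen xs).headD 0 + 1 else 0) ::
      pvBuildRlen xs = (pvRun xs + 1) :: pvBuildRlen xs
    rw [if_pos rfl, pvBuildRlen_headD]
  | some v => simp [pvBuildRlen, pvRun]

theorem pvInnerA_eq (m : List (Option Int)) (j sz : Nat) :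
    pvInnerA m j sz = sz + pvRun (m.drop j) := by
  by_cases h : m[j]? = some none
  · rw [pvInnerA, dif_pos h, pvInnerA_eq m (j+1) (sz+1)]
    obtain ⟨hj, hx⟩ := List.getElem?_eq_some_iff.mp h
    rw [List.drop_eq_getElem_cons hj, hx, pvRun]
    omega
  · rw [pvInnerA, dif_neg h]
    by_cases hj : j < m.length
    · rw [List.drop_eq_getElem_cons hj]
      cases hx : m[j]'hj with
      | none => exact absurd (List.getElem?_eq_some_iff.mpr ⟨hj, hx⟩) h
      | some v => simp [pvRun]
    · rw [List.drop_eq_nil_of_le (by omega)]; simp [pvRun]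
termination_by m.length - j
decreasing_by
  obtain ⟨hj, -⟩ := List.getElem?_eq_some_iff.mp h
  omega

theorem pvLoop_eq (bi_start size : Int) (m : List (Option Int)) (i : Nat) :
    pvLoopA bi_start size m i = pvScanB bi_start size (pvBuildRlen (m.drop i)) i := by
  by_cases h : i < m.length
  · rw [pvLoopA, dif_pos h, List.drop_eq_getElem_cons h, pvBuildRlen_cons, pvScanB]
    rw [pvInnerA_eq, ← List.drop_eq_getElem_cons h]
    simp only [Nat.zero_add]
    by_cases hb : (i : Int) ≥ bi_start
    · simp [hb]
    · simp only [if_neg hb]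
      by_cases hs : ((pvRun (m.drop i) : Nat) : Int) ≥ size
      · simp [hs]
      · rw [if_neg hs, if_neg hs, pvLoop_eq bi_start size m (i+1)]
  · rw [pvLoopA, dif_neg h, List.drop_eq_nil_of_le (by omega)]
    rfl
termination_by m.length - i

-- ===== VERDICT (by name: the statement is the Claim_ definition above) =====
theorem find_si_block_spec : Claim_equal_find_si_block := by
  intro bi_start size m _
  unfold Spec_find_si_block find_si_block find_si_block_alt
  simpa using pvLoop_eq bi_start size m 0
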